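-- pv_equiv track=rewrite | github.com/abhigyansinhaa/spaceApps-Bio-Engine | kgExtractor.py | verify_triple_in_text
-- ===== SOURCE A (Python) =====
-- from typing import List, Dict
--
-- def verify_triple_in_text(triple: Dict, text: str) -> bool:
--     """
--     Verify that triple components actually appear in the source text.
--     This is the key anti-hallucination check.
--     """
--     text_lower = text.lower()
--     subj_lower = triple["subject"].lower()
--     obj_lower = triple["object"].lower()
--
--     # Both subject and object must appear in text
--     if subj_lower not in text_lower or obj_lower not in text_lower:
--         return False
--
--     # For biological terms, allow some flexibility in matching
--     subj_variations = generate_term_variations(triple["subject"])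
--     obj_variations = generate_term_variations(triple["object"])
--
--     subj_found = any(var in text_lower for var in subj_variations)
--     obj_found = any(var in text_lower for var in obj_variations)
--
--     return subj_found and obj_found
--
-- def generate_term_variations(term: str) -> List[str]:
--     """Generate variations of a term for flexible matching"""
--     term_lower = term.lower()
--     variations = [term_lower]
--
--     # Add plural/singular variations
--     if term_lower.endswith('s') and len(term_lower) > 3:
--         variations.append(term_lower[:-1])  # Remove 's'
--     else:
--         variations.append(term_lower + 's')  # Add 's'
--
--     # Add common biological abbreviations
--     bio_abbrevs = {
--         "deoxyribonucleic acid": "dna",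
--         "ribonucleic acid": "rna",
--         "bone mineral density": "bmd",
--         "cardiovascular": "cv",
--         "central nervous system": "cns"
--     }
--
--     for full_term, abbrev in bio_abbrevs.items():
--         if full_term in term_lower:
--             variations.append(term_lower.replace(full_term, abbrev))
--         if abbrev == term_lower:
--             variations.append(full_term)
--
--     return variations
-- ===== SOURCE B (Python) =====
-- def verify_triple_in_text(triple, text):
--     # After lowercasing, presence of subject and object in the text is the whole
--     # decision: the variation lists A builds always contain the exact lowered term,
--     # so A's any() checks are implied by its early substring guard.
--     text_lower = text.lower()
--     subj_lower = triple["subject"].lower()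
--     obj_lower = triple["object"].lower()
--     return subj_lower in text_lower and obj_lower in text_lower
-- ===== Notes on version B (the rewrite author's own statement) =====
-- stated objective: simpler
-- what changed: B drops the variation-generation helper and the two any() scans entirely: since generate_term_variations always puts the exact lowercased term first, the early substring guard already decides the result, so B is just two lowercase membership tests.
import Mathlib
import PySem

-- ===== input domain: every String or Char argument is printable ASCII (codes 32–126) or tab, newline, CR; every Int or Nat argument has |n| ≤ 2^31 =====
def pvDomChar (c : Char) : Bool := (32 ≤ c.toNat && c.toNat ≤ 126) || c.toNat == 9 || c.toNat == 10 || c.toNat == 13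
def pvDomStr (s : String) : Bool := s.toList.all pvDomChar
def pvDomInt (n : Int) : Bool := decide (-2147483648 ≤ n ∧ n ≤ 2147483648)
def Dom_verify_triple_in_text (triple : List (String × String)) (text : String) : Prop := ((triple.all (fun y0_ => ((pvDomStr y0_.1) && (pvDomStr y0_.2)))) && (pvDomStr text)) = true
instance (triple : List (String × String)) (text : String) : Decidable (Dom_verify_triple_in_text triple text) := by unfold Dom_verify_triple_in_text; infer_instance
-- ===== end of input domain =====

-- B drops A's variation machinery: the variation list always starts with the exact
-- lowered term, so A's early substring guard already decides the result.

-- ===== PORT A =====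
-- helper: generate_term_variations, step for step
def generate_term_variations (term : String) : List String :=
  let term_lower := PySem.Str.lower term
  let variations := [term_lower]
  let variations :=
    if PySem.Str.endswith term_lower "s" && decide (3 < PySem.Str.len term_lower) then
      variations ++ [PySem.Str.slice term_lower none (some (-1))]   -- term_lower[:-1]
    else
      variations ++ [term_lower ++ "s"]
  let bio_abbrevs : List (String × String) :=
    [("deoxyribonucleic acid", "dna"), ("ribonucleic acid", "rna"),
     ("bone mineral density", "bmd"), ("cardiovascular", "cv"),
     ("central nervous system", "cns")]
  bio_abbrevs.foldl (fun vs p =>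
    let vs := if PySem.Str.isIn p.1 term_lower then vs ++ [PySem.Str.replace term_lower p.1 p.2] else vs
    if p.2 == term_lower then vs ++ [p.1] else vs) variations

def verify_triple_in_text (triple : List (String × String)) (text : String) : Bool :=
  match triple.lookup "subject", triple.lookup "object" with
  | some subj, some obj =>
    let text_lower := PySem.Str.lower text
    let subj_lower := PySem.Str.lower subj
    let obj_lower := PySem.Str.lower obj
    if !PySem.Str.isIn subj_lower text_lower || !PySem.Str.isIn obj_lower text_lower then
      false
    else
      let subj_variations := generate_term_variations subj
      let obj_variations := generate_term_variations obj
      let subj_found := subj_variations.any (fun v => PySem.Str.isIn v text_lower)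
      let obj_found := obj_variations.any (fun v => PySem.Str.isIn v text_lower)
      subj_found && obj_found
  | _, _ => false   -- KeyError in Python; excluded by Pre_

-- ===== PORT B =====
def verify_triple_in_text_alt (triple : List (String × String)) (text : String) : Bool :=
  match triple.lookup "subject" with
  | none => false   -- KeyError in Python; excluded by Pre_
  | some subj =>
    match triple.lookup "object" with
    | none => false   -- KeyError in Python; excluded by Pre_
    | some obj =>
      let text_lower := PySem.Str.lower text
      PySem.Str.isIn (PySem.Str.lower subj) text_lower &&
        PySem.Str.isIn (PySem.Str.lower obj) text_lower

-- ===== PRECONDITION & SPEC =====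
-- Pre_: the dict must carry both the "subject" and the "object" key; otherwise Python raises KeyError.
def Pre_verify_triple_in_text (triple : List (String × String)) (text : String) : Prop :=
  (triple.lookup "subject").isSome = true ∧ (triple.lookup "object").isSome = true
instance (triple : List (String × String)) (text : String) : Decidable (Pre_verify_triple_in_text triple text) := by unfold Pre_verify_triple_in_text; infer_instance

def pvWitness_verify_triple_in_text : (List (String × String)) × String :=
  ([("subject", "Cats"), ("object", "milk")], "cats love milk")

def Spec_verify_triple_in_text (triple : List (String × String)) (text : String) (out : Bool) : Prop := out = verify_triple_in_text_alt triple text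
instance (triple : List (String × String)) (text : String) (out : Bool) : Decidable (Spec_verify_triple_in_text triple text out) := by unfold Spec_verify_triple_in_text; infer_instance

-- ===== CLAIM (what is proved, stated in full; the proofs are below) =====
def Claim_equal_verify_triple_in_text : Prop := ∀ (triple : List (String × String)) (text : String), Dom_verify_triple_in_text triple text → Pre_verify_triple_in_text triple text → Spec_verify_triple_in_text triple text (verify_triple_in_text triple text)

-- ===== LEMMAS AND PROOFS =====

-- a fold whose step leaves the head of the accumulator in place keeps any head
theorem foldl_cons_head {α β : Type} (f : List α → β → List α)
    (h : ∀ l x a, f (a :: l) x = a :: f l x) :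
    ∀ (bs : List β) (a : α) (l : List α), List.foldl f (a :: l) bs = a :: List.foldl f l bs := by
  intro bs
  induction bs with
  | nil => intro a l; rfl
  | cons b bs ih => intro a l; simp only [List.foldl, h, ih]

-- the variation list always starts with the exact lowered term
theorem gtv_head (term : String) :
    ∃ rest, generate_term_variations term = PySem.Str.lower term :: rest := by
  unfold generate_term_variations
  simp only []
  split
  · exact ⟨_, foldl_cons_head _ (by intro l x a; beta_reduce; split_ifs <;> simp) _ _ _⟩
  · exact ⟨_, foldl_cons_head _ (by intro l x a; beta_reduce; split_ifs <;> simp) _ _ _⟩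

-- ===== VERDICT (by name: the statement is the Claim_ definition above) =====
theorem verify_triple_in_text_spec : Claim_equal_verify_triple_in_text := by
  intro triple text _ hpre
  obtain ⟨hs, ho⟩ := hpre
  unfold Spec_verify_triple_in_text verify_triple_in_text verify_triple_in_text_alt
  obtain ⟨subj, hsubj⟩ := Option.isSome_iff_exists.mp hs
  obtain ⟨obj, hobj⟩ := Option.isSome_iff_exists.mp ho
  rw [hsubj, hobj]
  by_cases h1 : PySem.Chars.isIn (PySem.Chars.lower subj.toList) (PySem.Chars.lower text.toList) = true
  · by_cases h2 : PySem.Chars.isIn (PySem.Chars.lower obj.toList) (PySem.Chars.lower text.toList) = true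
    · obtain ⟨r1, e1⟩ := gtv_head subj
      obtain ⟨r2, e2⟩ := gtv_head obj
      simp [e1, e2, h1, h2]
    · simp [h1, h2]
  · simp [h1]
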